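-- pv_equiv track=rewrite | github.com/usnistgov/OOF2 | SRC/engine/snaprefine2.py | findSignature
-- ===== SOURCE A (Python) =====
-- signature_base = 32
--
-- def findSignature(marks):
--     # Given a list of SementMarks for each side of an element, rotate
--     # a canonical starting point for the list, so that it can be used
--     # as an index into a table of refinement functions.  For a list
--     # [x,y,z], the canonical order is that which maximizes the number
--     # xyz in base signature_base.  This will fail if edges are ever
--     # divided into more than signature_base segments in one refinement
--     # operation.
--     n = len(marks)              # number of segments
--     maxkey = -1
--     imax = None
--     for i in range(n):
--         key = 0
--         for j in range(n):
--             key = signature_base*key + len(marks[(i+j)%n])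
--         if key > maxkey:
--             maxkey = key
--             imax = i
--     return imax, tuple(len(marks[(i+imax)%n]) for i in range(n))
-- ===== SOURCE B (Python) =====
-- signature_base = 32
--
-- def findSignature(marks):
--     # Rolling-key reimplementation: compute the base-32 key of rotation 0 once,
--     # then update each next rotation's key in O(1) big-int ops instead of
--     # recomputing it with an inner loop.
--     n = len(marks)
--     lens = [len(m) for m in marks]
--     if n == 0:
--         return None, ()
--     key = 0
--     for d in lens:
--         key = signature_base * key + d
--     top = signature_base ** n - 1
--     best_key, best_i = key, 0
--     for i in range(1, n):
--         key = signature_base * key - lens[i - 1] * top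
--         if key > best_key:
--             best_key, best_i = key, i
--     return best_i, tuple(lens[best_i:] + lens[:best_i])
-- ===== Notes on version B (the rewrite author's own statement) =====
-- stated objective: faster
-- what changed: B computes the rotation key of each starting index incrementally from the previous one (rolling base-32 key: key_i+1 = 32*key_i - d_i*(32^n - 1)) in a single pass, instead of A's nested loop that recomputes every rotation's key digit by digit; the result slice is taken directly from the precomputed length list.
import Mathlib
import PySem

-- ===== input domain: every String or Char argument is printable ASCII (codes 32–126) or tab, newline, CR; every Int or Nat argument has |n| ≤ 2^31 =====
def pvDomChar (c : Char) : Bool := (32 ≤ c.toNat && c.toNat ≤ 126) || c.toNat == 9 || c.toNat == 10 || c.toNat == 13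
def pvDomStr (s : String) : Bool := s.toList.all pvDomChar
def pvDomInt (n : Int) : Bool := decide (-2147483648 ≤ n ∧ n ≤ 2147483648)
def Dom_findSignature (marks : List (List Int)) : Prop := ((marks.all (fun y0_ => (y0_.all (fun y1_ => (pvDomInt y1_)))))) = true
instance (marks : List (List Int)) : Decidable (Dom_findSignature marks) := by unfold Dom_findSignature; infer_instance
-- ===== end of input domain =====

-- B replaces A's O(n^2) recompute-each-rotation-key nested loop by a single pass that
-- updates the base-32 rotation key incrementally (rolling key); same result everywhere.

-- ===== PORT A =====
def findSignature (marks : List (List Int)) : Option Int × List Int :=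
  let n : Int := (marks.length : Int)
  let st : Int × Option Int :=
    (PySem.List.pyRange 0 n 1).foldl (fun s i =>
      let key : Int :=
        (PySem.List.pyRange 0 n 1).foldl (fun key j =>
          32 * key + ((PySem.List.pyGetD marks (PySem.Int.mod (i + j) n) []).length : Int)) 0
      if key > s.1 then (key, some i) else s) (-1, none)
  -- `imax` (st.2) is `some _` whenever the final range is nonempty (n > 0),
  -- so `.getD 0` below is never read on `none` (Python would raise only in that dead case)
  (st.2, (PySem.List.pyRange 0 n 1).map (fun i =>
    ((PySem.List.pyGetD marks (PySem.Int.mod (i + st.2.getD 0) n) []).length : Int)))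

-- ===== PORT B =====
def findSignature_alt (marks : List (List Int)) : Option Int × List Int :=
  let lens : List Int := marks.map (fun m => (m.length : Int))
  if marks.length = 0 then (none, [])
  else
    let key0 : Int := lens.foldl (fun k d => 32 * k + d) 0
    let top : Int := 32 ^ marks.length - 1
    let st : Int × Int × Int :=
      (PySem.List.pyRange 1 (marks.length : Int) 1).foldl (fun s i =>
        let key : Int := 32 * s.1 - PySem.List.pyGetD lens (i - 1) 0 * top
        if key > s.2.1 then (key, key, i) else (key, s.2.1, s.2.2)) (key0, key0, 0)
    (some st.2.2,
      PySem.List.slice lens (some st.2.2) none ++ PySem.List.slice lens none (some st.2.2))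

-- ===== PRECONDITION & SPEC =====
def Spec_findSignature (marks : List (List Int)) (out : Option Int × List Int) : Prop := out = findSignature_alt marks
instance (marks : List (List Int)) (out : Option Int × List Int) : Decidable (Spec_findSignature marks out) := by unfold Spec_findSignature; infer_instance

-- ===== CLAIM (what is proved, stated in full; the proofs are below) =====
def Claim_equal_findSignature : Prop := ∀ (marks : List (List Int)), Dom_findSignature marks → Spec_findSignature marks (findSignature marks)

-- ===== LEMMAS AND PROOFS =====

def pvHorner (l : List Int) : Int := l.foldl (fun k d => 32 * k + d) 0
def pvRot (l : List Int) (i : Nat) : List Int := l.drop i ++ l.take i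
def pvK (l : List Int) (i : Nat) : Int := pvHorner (pvRot l i)
-- B's loop body over Nat indices
def pvStepB (l : List Int) (s : Int × Int × Int) (k : Nat) : Int × Int × Int :=
  let key : Int := 32 * s.1 - l.getD k 0 * (32 ^ l.length - 1)
  if key > s.2.1 then (key, key, 1 + (k : Int)) else (key, s.2.1, s.2.2)

theorem pvHorner_shift (l : List Int) (k : Int) :
    l.foldl (fun a d => 32 * a + d) k = k * 32 ^ l.length + pvHorner l := by
  induction l generalizing k with
  | nil => simp [pvHorner]
  | cons x t ih =>
    simp only [List.foldl_cons, List.length_cons, pvHorner]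
    rw [ih (32 * k + x), ih (32 * 0 + x)]
    ring

theorem pvHorner_nonneg (l : List Int) (h : ∀ d ∈ l, 0 ≤ d) : 0 ≤ pvHorner l := by
  induction l with
  | nil => simp [pvHorner]
  | cons x t ih =>
    have hx : 0 ≤ x := h x (by simp)
    have ht : 0 ≤ pvHorner t := ih (fun d hd => h d (by simp [hd]))
    have := pvHorner_shift t (32 * 0 + x)
    simp only [pvHorner, List.foldl_cons] at *
    rw [this]
    positivity

theorem pvK_nonneg (l : List Int) (i : Nat) (h : ∀ d ∈ l, 0 ≤ d) : 0 ≤ pvK l i := by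
  apply pvHorner_nonneg
  intro d hd
  rcases List.mem_append.1 hd with h1 | h1
  · exact h d (List.mem_of_mem_drop h1)
  · exact h d (List.mem_of_mem_take h1)

theorem pvK_rec (l : List Int) (m : Nat) (h : m + 1 < l.length) :
    pvK l (m + 1) = 32 * pvK l m - l.getD m 0 * (32 ^ l.length - 1) := by
  have hm : m < l.length := by omega
  have hd : l.getD m 0 = l[m] := List.getD_eq_getElem l 0 hm
  have hdrop : l.drop m = l[m] :: l.drop (m + 1) := List.drop_eq_getElem_cons hm
  have htake : l.take (m + 1) = l.take m ++ [l[m]] := by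
    rw [List.take_add_one]
    simp [List.getElem?_eq_getElem hm]
  have hr1 : pvRot l m = l[m] :: (l.drop (m + 1) ++ l.take m) := by
    rw [pvRot, hdrop]
    rfl
  have hr2 : pvRot l (m + 1) = (l.drop (m + 1) ++ l.take m) ++ [l[m]] := by
    rw [pvRot, htake, List.append_assoc]
  have hlen : (l.drop (m + 1) ++ l.take m).length = l.length - 1 := by
    simp [List.length_drop, List.length_take]
    omega
  have h1 : pvK l m = l[m] * 32 ^ (l.drop (m + 1) ++ l.take m).length
      + pvHorner (l.drop (m + 1) ++ l.take m) := by
    rw [pvK, hr1, pvHorner, List.foldl_cons, pvHorner_shift]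
    ring_nf
  have h2 : pvK l (m + 1) = 32 * pvHorner (l.drop (m + 1) ++ l.take m) + l[m] := by
    rw [pvK, hr2, pvHorner, List.foldl_append]
    simp only [List.foldl_cons, List.foldl_nil]
    rw [pvHorner]
  rw [h2, h1, hd]
  have hpow : (32:Int) ^ l.length = 32 * 32 ^ (l.drop (m + 1) ++ l.take m).length := by
    rw [hlen, ← pow_succ']
    congr 1
    omega
  rw [hpow]
  ring

theorem pvRot_digits (l : List Int) (b : Nat) (hb : b < l.length) :
    (List.range l.length).map (fun k => l.getD ((b + k) % l.length) 0) = pvRot l b := by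
  apply List.ext_getElem
  · simp [pvRot, List.length_take, List.length_drop]; omega
  · intro k h1 h2
    simp only [List.getElem_map, List.getElem_range]
    by_cases hk : b + k < l.length
    · have : (b + k) % l.length = b + k := Nat.mod_eq_of_lt hk
      rw [this, List.getD_eq_getElem l 0 hk]
      simp only [pvRot]
      rw [List.getElem_append_left (by simp [List.length_drop]; omega)]
      simp
    · have hkr : k < l.length := by simpa using h1
      have : (b + k) % l.length = b + k - l.length := by
        rw [Nat.mod_eq_sub_mod (by omega), Nat.mod_eq_of_lt (by omega)]
      rw [this, List.getD_eq_getElem l 0 (by omega)]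
      simp only [pvRot]
      rw [List.getElem_append_right (by simp [List.length_drop]; omega)]
      simp only [List.getElem_take, List.length_drop]
      congr 1
      omega

theorem pv_len_getD (marks : List (List Int)) (e : Int) :
    ((PySem.List.pyGetD marks e []).length : Int)
      = PySem.List.pyGetD (marks.map (fun m => (m.length : Int))) e 0 := by
  have := PySem.List.pyGetD_map (fun m : List Int => (m.length : Int)) marks e []
  simpa using this.symm

theorem pv_innerA (marks : List (List Int)) (k : Nat) (hk : k < marks.length) :
    (PySem.List.pyRange 0 (marks.length : Int) 1).foldl
        (fun key j => 32 * key + ((PySem.List.pyGetD marks (PySem.Int.mod ((k : Int) + j) (marks.length : Int)) []).length : Int)) 0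
      = pvK (marks.map (fun m => (m.length : Int))) k := by
  set l : List Int := marks.map (fun m => (m.length : Int)) with hl
  rw [PySem.List.pyRange_zero_natCast, List.foldl_map]
  have hstep : ∀ (acc : Int), ∀ j ∈ List.range marks.length,
      (fun (key : Int) (j : Nat) => 32 * key + ((PySem.List.pyGetD marks (PySem.Int.mod ((k : Int) + (j : Int)) (marks.length : Int)) []).length : Int)) acc j
      = (fun (key : Int) (j : Nat) => 32 * key + l.getD ((k + j) % marks.length) 0) acc j := by
    intro acc j hj
    simp only []
    rw [pv_len_getD, ← hl, ← Nat.cast_add, PySem.Int.mod_natCast, PySem.List.pyGetD_natCast]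
  rw [PySem.List.foldl_congr_mem _ _ _ _ hstep]
  have : (List.range marks.length).foldl (fun (key : Int) (j : Nat) => 32 * key + l.getD ((k + j) % marks.length) 0) 0
      = ((List.range marks.length).map (fun j => l.getD ((k + j) % marks.length) 0)).foldl (fun key d => 32 * key + d) 0 := by
    rw [List.foldl_map]
  rw [this]
  have hlen : marks.length = l.length := by simp [hl]
  rw [pvK, ← pvRot_digits l k (by omega)]
  rw [pvHorner, hlen]

theorem pv_outA (marks : List (List Int)) (b : Nat) (hb : b < marks.length) :
    (PySem.List.pyRange 0 (marks.length : Int) 1).map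
        (fun i => ((PySem.List.pyGetD marks (PySem.Int.mod (i + (b : Int)) (marks.length : Int)) []).length : Int))
      = pvRot (marks.map (fun m => (m.length : Int))) b := by
  set l : List Int := marks.map (fun m => (m.length : Int)) with hl
  rw [PySem.List.pyRange_zero_natCast, List.map_map]
  have hlen : marks.length = l.length := by simp [hl]
  rw [← pvRot_digits l b (by omega), ← hlen]
  apply List.map_congr_left
  intro j hj
  simp only [Function.comp]
  rw [pv_len_getD, ← hl, ← Nat.cast_add, PySem.Int.mod_natCast, PySem.List.pyGetD_natCast]
  rw [Nat.add_comm j b]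

theorem pv_inv (l : List Int) (h0 : ∀ d ∈ l, 0 ≤ d) (m : Nat) (hm : m < l.length) :
    ∃ b : Nat, b ≤ m ∧
      (List.range (m + 1)).foldl
          (fun s k => if pvK l k > s.1 then (pvK l k, some ((k : Nat) : Int)) else s)
          ((-1 : Int), (none : Option Int))
        = (((List.range m).foldl (pvStepB l) (pvK l 0, pvK l 0, 0)).2.1, some ((b : Nat) : Int)) ∧
      ((List.range m).foldl (pvStepB l) (pvK l 0, pvK l 0, 0)).2.2 = ((b : Nat) : Int) ∧
      ((List.range m).foldl (pvStepB l) (pvK l 0, pvK l 0, 0)).1 = pvK l m := by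
  induction m with
  | zero =>
    refine ⟨0, le_refl _, ?_, by simp, by simp⟩
    have h00 : 0 ≤ pvK l 0 := pvK_nonneg l 0 h0
    simp [List.range_succ]
    omega
  | succ m ih =>
    obtain ⟨b, hb, hA, hB2, hB1⟩ := ih (by omega)
    have hrec : 32 * ((List.range m).foldl (pvStepB l) (pvK l 0, pvK l 0, 0)).1
        - l.getD m 0 * (32 ^ l.length - 1) = pvK l (m + 1) := by
      rw [hB1, ← pvK_rec l m hm]
    rw [List.range_succ, List.foldl_append, List.foldl_cons, List.foldl_nil, hA,
        List.range_succ, List.foldl_append, List.foldl_cons, List.foldl_nil]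
    simp only [pvStepB, hrec]
    by_cases hgt : pvK l (m + 1) > ((List.range m).foldl (pvStepB l) (pvK l 0, pvK l 0, 0)).2.1
    · refine ⟨m + 1, le_refl _, ?_⟩
      rw [if_pos hgt, if_pos hgt]
      have hc : ((m : Int) + 1) = 1 + (m : Int) := by ring
      refine ⟨by simp [hc], by simp [hc], by simp⟩
    · refine ⟨b, by omega, ?_⟩
      rw [if_neg hgt, if_neg hgt]
      exact ⟨by simp, by simpa using hB2, by simp⟩

theorem pv_main (marks : List (List Int)) : findSignature marks = findSignature_alt marks := by
  by_cases hnil : marks.length = 0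
  · have : marks = [] := List.length_eq_zero_iff.mp hnil
    subst this
    decide
  · set l : List Int := marks.map (fun m => (m.length : Int)) with hl
    have hln : l.length = marks.length := by simp [hl]
    have hn0 : 0 < marks.length := Nat.pos_of_ne_zero hnil
    have h0 : ∀ d ∈ l, 0 ≤ d := by
      intro d hd
      rw [hl] at hd
      obtain ⟨m, _, rfl⟩ := List.mem_map.1 hd
      positivity
    -- A's outer fold rewritten over Nat range with pvK keys
    have hAfold :
        (PySem.List.pyRange 0 (marks.length : Int) 1).foldl (fun (s : Int × Option Int) i =>
            if (PySem.List.pyRange 0 (marks.length : Int) 1).foldl (fun key j =>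
                32 * key + ((PySem.List.pyGetD marks (PySem.Int.mod (i + j) (marks.length : Int)) []).length : Int)) 0 > s.1
            then ((PySem.List.pyRange 0 (marks.length : Int) 1).foldl (fun key j =>
                32 * key + ((PySem.List.pyGetD marks (PySem.Int.mod (i + j) (marks.length : Int)) []).length : Int)) 0, some i)
            else s) (-1, none)
        = (List.range marks.length).foldl
            (fun s k => if pvK l k > s.1 then (pvK l k, some ((k : Nat) : Int)) else s)
            ((-1 : Int), (none : Option Int)) := by
      conv_lhs => rw [PySem.List.pyRange_zero_natCast]
      rw [List.foldl_map]
      apply PySem.List.foldl_congr_mem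
      intro acc k hk
      have hk' : k < marks.length := List.mem_range.1 hk
      rw [← PySem.List.pyRange_zero_natCast marks.length, pv_innerA marks k hk', hl]
    have pvK_zero : pvK l 0 = l.foldl (fun k d => 32 * k + d) 0 := by
      simp [pvK, pvRot, pvHorner]
    have hBfold :
        (PySem.List.pyRange 1 (marks.length : Int) 1).foldl (fun (s : Int × Int × Int) i =>
            if 32 * s.1 - PySem.List.pyGetD l (i - 1) 0 * (32 ^ marks.length - 1) > s.2.1
            then (32 * s.1 - PySem.List.pyGetD l (i - 1) 0 * (32 ^ marks.length - 1),
                  32 * s.1 - PySem.List.pyGetD l (i - 1) 0 * (32 ^ marks.length - 1), i)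
            else (32 * s.1 - PySem.List.pyGetD l (i - 1) 0 * (32 ^ marks.length - 1), s.2.1, s.2.2))
          (l.foldl (fun k d => 32 * k + d) 0, l.foldl (fun k d => 32 * k + d) 0, 0)
        = (List.range (marks.length - 1)).foldl (pvStepB l) (pvK l 0, pvK l 0, 0) := by
      rw [PySem.List.pyRange_one, show (((marks.length : Int) - 1).toNat) = marks.length - 1 from by omega,
          List.foldl_map, pvK_zero]
      apply PySem.List.foldl_congr_mem
      intro acc k hk
      have hik : (1 : Int) + (k : Int) - 1 = ((k : Nat) : Int) := by ring
      rw [hik, PySem.List.pyGetD_natCast, pvStepB, hln]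
    obtain ⟨b, hb, hA, hB2, hB1⟩ := pv_inv l h0 (marks.length - 1) (by omega)
    rw [show marks.length - 1 + 1 = marks.length from by omega] at hA
    have hbn : b < marks.length := by omega
    simp only [findSignature, findSignature_alt, if_neg hnil]
    rw [hAfold, hA, hBfold, hB2]
    refine Prod.ext rfl ?_
    simp only [Option.getD_some]
    rw [pv_outA marks b hbn, PySem.List.slice_from_natCast, PySem.List.slice_to_natCast, ← hl]
    rfl

-- ===== VERDICT (by name: the statement is the Claim_ definition above) =====
theorem findSignature_spec : Claim_equal_findSignature := by
  intro marks _
  unfold Spec_findSignature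
  exact pv_main marks
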